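-- pv_equiv track=rewrite | github.com/kostichs/comp_description | description_generator/generator.py | _prepare_text_source
-- ===== SOURCE A (Python) =====
-- from typing import List, Dict, Any, Optional, Union
--
-- def _prepare_text_source(company_name: str, findings: List[Dict[str, Any]]) -> str:
--     """
--     Подготавливает текстовый источник для генерации описания из найденных данных.
--
--     Args:
--         company_name: Название компании
--         findings: Список результатов от различных финдеров
--
--     Returns:
--         str: Текстовый источник для генерации описания
--     """
--     # Извлекаем различные типы данных
--     homepage_url = None
--     linkedin_url = None
--     linkedin_snippet = None
--     llm_deep_search_report = None
--
--     # Проходим по всем результатам и извлекаем нужные данные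
--     for finding in findings:
--         source = finding.get("source", "")
--         result = finding.get("result")
--
--         if not result:
--             continue
--
--         if source == "llm_deep_search":
--             llm_deep_search_report = result
--         elif source == "linkedin_finder":
--             linkedin_url = result
--             linkedin_snippet = finding.get("snippet")
--         elif "homepage_finder" not in source and not homepage_url:
--             homepage_url = result
--
--     # Собираем все данные в единый текст
--     text_parts = []
--
--     # Добавляем основную информацию о компании
--     text_parts.append(f"Company Information: {company_name}")
--
--     if homepage_url:
--         text_parts.append(f"Official Website: {homepage_url}")
--
--     if linkedin_url:
--         text_parts.append(f"LinkedIn: {linkedin_url}")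
--
--     if linkedin_snippet:
--         text_parts.append(f"LinkedIn Description: {linkedin_snippet}")
--
--     # Если есть отчет от LLM Deep Search, добавляем его как основной источник данных
--     if llm_deep_search_report:
--         text_parts.append("--- Detailed Report ---")
--         text_parts.append(llm_deep_search_report)
--
--     # Объединяем все части в единый текст
--     return "\n\n".join(text_parts)
-- ===== SOURCE B (Python) =====
-- def _prepare_text_source(company_name, findings):
--     # Per-field targeted searches instead of one stateful if/elif loop:
--     # last-wins fields via reversed(), first-wins homepage via a forward scan.
--     llm_deep_search_report = next(
--         (f["result"] for f in reversed(findings)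
--          if f.get("source", "") == "llm_deep_search" and f.get("result")),
--         None)
--     li = next(
--         (f for f in reversed(findings)
--          if f.get("source", "") == "linkedin_finder" and f.get("result")),
--         None)
--     linkedin_url = li["result"] if li is not None else None
--     linkedin_snippet = li.get("snippet") if li is not None else None
--     homepage_url = next(
--         (f["result"] for f in findings
--          if f.get("result")
--          and f.get("source", "") not in ("llm_deep_search", "linkedin_finder")
--          and "homepage_finder" not in f.get("source", "")),
--         None)
--
--     text_parts = [f"Company Information: {company_name}"]
--     if homepage_url:
--         text_parts.append(f"Official Website: {homepage_url}")
--     if linkedin_url: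
--         text_parts.append(f"LinkedIn: {linkedin_url}")
--     if linkedin_snippet:
--         text_parts.append(f"LinkedIn Description: {linkedin_snippet}")
--     if llm_deep_search_report:
--         text_parts.append("--- Detailed Report ---")
--         text_parts.append(llm_deep_search_report)
--     return "\n\n".join(text_parts)
-- ===== Notes on version B (the rewrite author's own statement) =====
-- stated objective: alternative
-- what changed: Replaces the single stateful if/elif loop with three independent targeted searches: reversed-scan next() for the last-wins llm report and linkedin finding, and a forward next() for the first-wins homepage url.
import Mathlib
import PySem

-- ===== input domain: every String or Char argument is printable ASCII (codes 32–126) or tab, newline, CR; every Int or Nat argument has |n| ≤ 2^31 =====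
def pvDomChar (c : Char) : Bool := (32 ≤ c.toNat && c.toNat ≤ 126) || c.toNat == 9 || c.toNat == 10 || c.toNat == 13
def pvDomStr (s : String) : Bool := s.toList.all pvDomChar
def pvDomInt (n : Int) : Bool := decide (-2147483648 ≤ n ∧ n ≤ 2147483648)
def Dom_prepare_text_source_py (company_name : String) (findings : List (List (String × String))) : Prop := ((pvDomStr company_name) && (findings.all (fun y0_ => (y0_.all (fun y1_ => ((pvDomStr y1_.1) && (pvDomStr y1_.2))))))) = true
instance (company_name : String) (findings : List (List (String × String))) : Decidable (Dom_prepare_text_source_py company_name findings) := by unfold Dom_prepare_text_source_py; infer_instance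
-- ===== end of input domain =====

-- B replaces A's single stateful if/elif loop with three independent targeted
-- searches (reversed find for the last-wins fields, forward find for homepage);
-- objective: alternative decomposition, same cost.

-- dict.get(k) on an association list: first match
def pvGet (d : List (String × String)) (k : String) : Option String :=
  (d.find? (fun p => p.1 == k)).map (·.2)

-- Python truthiness of an Optional[str]
def pvTruthy : Option String → Bool
  | none => false
  | some s => !(s == "")

-- ===== PORT A =====
-- loop body of A: state = (homepage_url, linkedin_url, linkedin_snippet, llm_deep_search_report)
def pvStepA (st : Option String × Option String × Option String × Option String)
    (finding : List (String × String)) :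
    Option String × Option String × Option String × Option String :=
  let source := (pvGet finding "source").getD ""
  let result := pvGet finding "result"
  match result with
  | none => st
  | some r =>
    if r == "" then st
    else if source == "llm_deep_search" then (st.1, st.2.1, st.2.2.1, some r)
    else if source == "linkedin_finder" then (st.1, some r, pvGet finding "snippet", st.2.2.2)
    else if !(PySem.Str.isIn "homepage_finder" source) && !(pvTruthy st.1) then
      (some r, st.2.1, st.2.2.1, st.2.2.2)
    else st

def prepare_text_source_py (company_name : String) (findings : List (List (String × String))) : String :=
  let st := findings.foldl pvStepA (none, none, none, none)
  let text_parts := ["Company Information: " ++ company_name]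
  let text_parts := if pvTruthy st.1 then text_parts ++ ["Official Website: " ++ st.1.getD ""] else text_parts
  let text_parts := if pvTruthy st.2.1 then text_parts ++ ["LinkedIn: " ++ st.2.1.getD ""] else text_parts
  let text_parts := if pvTruthy st.2.2.1 then text_parts ++ ["LinkedIn Description: " ++ st.2.2.1.getD ""] else text_parts
  let text_parts := if pvTruthy st.2.2.2 then text_parts ++ ["--- Detailed Report ---", st.2.2.2.getD ""] else text_parts
  PySem.Str.join "\n\n" text_parts

-- ===== PORT B =====
def pvIsLLM (f : List (String × String)) : Bool :=
  (pvGet f "source").getD "" == "llm_deep_search" && pvTruthy (pvGet f "result")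

def pvIsLI (f : List (String × String)) : Bool :=
  (pvGet f "source").getD "" == "linkedin_finder" && pvTruthy (pvGet f "result")

def pvIsHome (f : List (String × String)) : Bool :=
  pvTruthy (pvGet f "result")
    && !((pvGet f "source").getD "" == "llm_deep_search" || (pvGet f "source").getD "" == "linkedin_finder")
    && !(PySem.Str.isIn "homepage_finder" ((pvGet f "source").getD ""))

def prepare_text_source_py_alt (company_name : String) (findings : List (List (String × String))) : String :=
  let llm_deep_search_report := (findings.reverse.find? pvIsLLM).bind (fun f => pvGet f "result")
  let li := findings.reverse.find? pvIsLI
  let linkedin_url := li.bind (fun f => pvGet f "result")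
  let linkedin_snippet := li.bind (fun f => pvGet f "snippet")
  let homepage_url := (findings.find? pvIsHome).bind (fun f => pvGet f "result")
  let text_parts := ["Company Information: " ++ company_name]
  let text_parts := if pvTruthy homepage_url then text_parts ++ ["Official Website: " ++ homepage_url.getD ""] else text_parts
  let text_parts := if pvTruthy linkedin_url then text_parts ++ ["LinkedIn: " ++ linkedin_url.getD ""] else text_parts
  let text_parts := if pvTruthy linkedin_snippet then text_parts ++ ["LinkedIn Description: " ++ linkedin_snippet.getD ""] else text_parts
  let text_parts := if pvTruthy llm_deep_search_report then text_parts ++ ["--- Detailed Report ---", llm_deep_search_report.getD ""] else text_parts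
  PySem.Str.join "\n\n" text_parts

-- ===== PRECONDITION & SPEC =====
def Spec_prepare_text_source_py (company_name : String) (findings : List (List (String × String))) (out : String) : Prop := out = prepare_text_source_py_alt company_name findings
instance (company_name : String) (findings : List (List (String × String))) (out : String) : Decidable (Spec_prepare_text_source_py company_name findings out) := by unfold Spec_prepare_text_source_py; infer_instance

-- ===== CLAIM (what is proved, stated in full; the proofs are below) =====
def Claim_equal_prepare_text_source_py : Prop := ∀ (company_name : String) (findings : List (List (String × String))), Dom_prepare_text_source_py company_name findings → Spec_prepare_text_source_py company_name findings (prepare_text_source_py company_name findings)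

-- ===== LEMMAS AND PROOFS =====

-- loop invariant: the fold state is determined by three independent searches
theorem pvFold_eq (l : List (List (String × String)))
    (s : Option String × Option String × Option String × Option String) :
    l.foldl pvStepA s =
      ((if pvTruthy s.1 then s.1
        else match l.find? pvIsHome with
             | some f => pvGet f "result"
             | none => s.1),
       (match l.reverse.find? pvIsLI with
        | some f => pvGet f "result"
        | none => s.2.1),
       (match l.reverse.find? pvIsLI with
        | some f => pvGet f "snippet"
        | none => s.2.2.1),
       (match l.reverse.find? pvIsLLM with
        | some f => pvGet f "result"
        | none => s.2.2.2)) := by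
  induction l generalizing s with
  | nil => cases s with | mk a t => simp
  | cons x l ih =>
    obtain ⟨h, u, sn, m⟩ := s
    rw [List.foldl_cons, ih]
    rcases hr : pvGet x "result" with _ | r
    · have hLLM : pvIsLLM x = false := by simp [pvIsLLM, pvTruthy, hr]
      have hLI : pvIsLI x = false := by simp [pvIsLI, pvTruthy, hr]
      have hH : pvIsHome x = false := by simp [pvIsHome, pvTruthy, hr]
      rcases hFL : List.find? pvIsLLM l.reverse with _ | gL <;>
        rcases hFI : List.find? pvIsLI l.reverse with _ | gI <;>
          simp [List.find?_append, pvStepA, hr, hFL, hFI, hLLM, hLI, hH]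
    · by_cases hre : r = ""
      · subst hre
        have hLLM : pvIsLLM x = false := by simp [pvIsLLM, pvTruthy, hr]
        have hLI : pvIsLI x = false := by simp [pvIsLI, pvTruthy, hr]
        have hH : pvIsHome x = false := by simp [pvIsHome, pvTruthy, hr]
        rcases hFL : List.find? pvIsLLM l.reverse with _ | gL <;>
          rcases hFI : List.find? pvIsLI l.reverse with _ | gI <;>
            simp [List.find?_append, pvStepA, hr, hFL, hFI, hLLM, hLI, hH]
      · by_cases hs1 : (pvGet x "source").getD "" = "llm_deep_search"
        · have hLLM : pvIsLLM x = true := by simp [pvIsLLM, pvTruthy, hr, hs1, hre]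
          have hLI : pvIsLI x = false := by simp [pvIsLI, hs1]
          have hH : pvIsHome x = false := by simp [pvIsHome, hs1]
          rcases hFL : List.find? pvIsLLM l.reverse with _ | gL <;>
            rcases hFI : List.find? pvIsLI l.reverse with _ | gI <;>
              simp [List.find?_append, pvStepA, hr, hre, hs1, hFL, hFI, hLLM, hLI, hH]
        · by_cases hs2 : (pvGet x "source").getD "" = "linkedin_finder"
          · have hLLM : pvIsLLM x = false := by simp [pvIsLLM, hs2]
            have hLI : pvIsLI x = true := by simp [pvIsLI, pvTruthy, hr, hs2, hre]
            have hH : pvIsHome x = false := by simp [pvIsHome, hs2]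
            rcases hFL : List.find? pvIsLLM l.reverse with _ | gL <;>
              rcases hFI : List.find? pvIsLI l.reverse with _ | gI <;>
                simp [List.find?_append, pvStepA, hr, hre, hs1, hs2, hFL, hFI, hLLM, hLI, hH]
          · have hLLM : pvIsLLM x = false := by simp [pvIsLLM, hs1]
            have hLI : pvIsLI x = false := by simp [pvIsLI, hs2]
            by_cases hin : PySem.Str.isIn "homepage_finder" ((pvGet x "source").getD "") = true
            · simp at hin
              have hH : pvIsHome x = false := by simp [pvIsHome, hin]
              rcases hFL : List.find? pvIsLLM l.reverse with _ | gL <;>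
                rcases hFI : List.find? pvIsLI l.reverse with _ | gI <;>
                  simp [List.find?_append, pvStepA, hr, hre, hs1, hs2, hin, hFL, hFI, hLLM, hLI, hH]
            · simp at hin
              have hH : pvIsHome x = true := by
                simp [pvIsHome, pvTruthy, hr, hre, hs1, hs2, hin]
              rcases h with _ | hstr
              · rcases hFL : List.find? pvIsLLM l.reverse with _ | gL <;>
                  rcases hFI : List.find? pvIsLI l.reverse with _ | gI <;>
                    simp [List.find?_append, pvStepA, pvTruthy, hr, hre, hs1, hs2, hin, hFL, hFI, hLLM, hLI, hH]
              · by_cases hhe : hstr = ""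
                · subst hhe
                  rcases hFL : List.find? pvIsLLM l.reverse with _ | gL <;>
                    rcases hFI : List.find? pvIsLI l.reverse with _ | gI <;>
                      simp [List.find?_append, pvStepA, pvTruthy, hr, hre, hs1, hs2, hin, hFL, hFI, hLLM, hLI, hH]
                · rcases hFL : List.find? pvIsLLM l.reverse with _ | gL <;>
                    rcases hFI : List.find? pvIsLI l.reverse with _ | gI <;>
                      simp [List.find?_append, pvStepA, pvTruthy, hr, hre, hs1, hs2, hin, hhe, hFL, hFI, hLLM, hLI, hH]

-- ===== VERDICT (by name: the statement is the Claim_ definition above) =====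
theorem prepare_text_source_py_spec : Claim_equal_prepare_text_source_py := by
  intro company_name findings _
  unfold Spec_prepare_text_source_py prepare_text_source_py prepare_text_source_py_alt
  rw [pvFold_eq]
  simp only [pvTruthy]
  rcases findings.find? pvIsHome with _ | fH <;>
    rcases findings.reverse.find? pvIsLI with _ | fLI <;>
      rcases findings.reverse.find? pvIsLLM with _ | fLLM <;>
        simp [Option.bind, pvTruthy]
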